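-- pv_equiv track=rewrite | github.com/nahn20/Quantum-LCA | Quantum LCA/letter_index.py | letter_index
-- ===== SOURCE A (Python) =====
-- def letter_index(num, var):
--     p = 0
--     while(num >= 26**p): #Determining necessary number of digits
--         p += 1
--     if(num == 0):
--         return "%s_a"%(var)
--     out = "%s_"%(var) #Building modifiable out string
--     for i in reversed(range(p)):
--         digit = int(num / 26**i)
--         num -= digit*26**i
--         out += chr(digit+97)
--     return out
-- ===== SOURCE B (Python) =====
-- def letter_index(num, var):
--     if num == 0:
--         return "%s_a" % (var)
--     digits = []
--     n = num
--     while n > 0: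
--         digits.append(chr(n % 26 + 97))
--         n //= 26
--     return var + "_" + "".join(reversed(digits))
-- ===== Notes on version B (the rewrite author's own statement) =====
-- stated objective: idiomatic
-- what changed: Replaces the upfront digit-count loop with 26**i powers and MSB-first float-division digit extraction by a single LSB-first divmod loop whose digit list is reversed and joined.
import Mathlib
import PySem

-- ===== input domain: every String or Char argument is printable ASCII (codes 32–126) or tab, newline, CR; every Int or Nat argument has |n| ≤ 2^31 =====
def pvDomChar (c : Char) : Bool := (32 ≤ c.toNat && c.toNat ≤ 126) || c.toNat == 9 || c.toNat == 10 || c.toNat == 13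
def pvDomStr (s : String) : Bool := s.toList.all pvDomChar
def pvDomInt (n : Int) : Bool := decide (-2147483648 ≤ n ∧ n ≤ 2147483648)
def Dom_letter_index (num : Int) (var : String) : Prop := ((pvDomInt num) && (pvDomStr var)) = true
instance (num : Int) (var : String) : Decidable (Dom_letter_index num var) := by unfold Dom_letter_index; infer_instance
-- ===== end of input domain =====

-- B replaces A's upfront digit-count loop and MSB-first power-of-26 division by an
-- idiomatic LSB-first divmod loop whose digit list is reversed and joined (same values).

-- ===== PORT A =====
-- chr(d + 97)
def chrI (d : Int) : Char := Char.ofNat (d + 97).toNat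

-- termination measure fact for A's while loop (cited by name in decreasing_by)
lemma findP_dec (num : Int) (p : Nat) (h : (26:Int)^p ≤ num) :
    num.toNat - (p + 1) < num.toNat - p := by
  have h1 : ((p:Int)) < (26:Int)^p := by
    exact_mod_cast Nat.lt_pow_self (by norm_num : 1 < 26) (n := p)
  have h2 : (p:Int) < num := lt_of_lt_of_le h1 h
  omega

-- while(num >= 26**p): p += 1
def findP (num : Int) (p : Nat) : Nat :=
  if h : (26:Int)^p ≤ num then findP num (p+1) else p
termination_by num.toNat - p
decreasing_by exact findP_dec num p h

-- one iteration of A's for-loop body: digit = int(num / 26**i); num -= digit*26**i; out += chr(digit+97)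
-- (int(num / 26**i) is exact truncation here: on Dom, |num| ≤ 2^31 < 2^53)
def stepA (s : List Char × Int) (i : Nat) : List Char × Int :=
  let digit := PySem.Int.truncdiv s.2 ((26:Int)^i)
  (s.1 ++ [chrI digit], s.2 - digit * (26:Int)^i)

def letter_index (num : Int) (var : String) : String :=
  let p := findP num 0
  if num = 0 then String.ofList (var.toList ++ ['_', 'a'])
  else
    String.ofList (((List.range p).reverse).foldl stepA (var.toList ++ ['_'], num)).1

-- ===== PORT B =====
-- while n > 0: digits.append(chr(n % 26 + 97)); n //= 26
-- termination measure fact for B's while loop (cited by name in decreasing_by)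
lemma altLoop_dec (n : Int) (h : 0 < n) : (PySem.Int.floordiv n 26).toNat < n.toNat := by
  have e : PySem.Int.floordiv n 26 = n / 26 := PySem.Int.floordiv_eq_ediv_of_pos (by norm_num)
  rw [e]; omega

def chrB (d : Int) : Char := Char.ofNat (d + 97).toNat

def altLoop (n : Int) (ds : List Char) : List Char :=
  if _h : 0 < n then altLoop (PySem.Int.floordiv n 26) (ds ++ [chrB (PySem.Int.mod n 26)]) else ds
termination_by n.toNat
decreasing_by exact altLoop_dec n _h

def letter_index_alt (num : Int) (var : String) : String :=
  if num = 0 then String.ofList (var.toList ++ ['_', 'a'])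
  else String.ofList (var.toList ++ ['_'] ++ (altLoop num []).reverse)

-- ===== PRECONDITION & SPEC =====
def Spec_letter_index (num : Int) (var : String) (out : String) : Prop := out = letter_index_alt num var
instance (num : Int) (var : String) (out : String) : Decidable (Spec_letter_index num var out) := by unfold Spec_letter_index; infer_instance

-- ===== CLAIM (what is proved, stated in full; the proofs are below) =====
def Claim_equal_letter_index : Prop := ∀ (num : Int) (var : String), Dom_letter_index num var → Spec_letter_index num var (letter_index num var)

-- ===== LEMMAS AND PROOFS =====

-- chr of a Nat digit
def chrN (d : Nat) : Char := Char.ofNat (d + 97)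

lemma chrI_natCast (d : Nat) : chrI (d : Int) = chrN d := by
  unfold chrI chrN; congr 1

lemma chrB_natCast (d : Nat) : chrB (d : Int) = chrN d := by
  unfold chrB chrN; congr 1

-- LSB-first base-26 digits of m (what B computes)
def lsdN (m : Nat) : List Nat :=
  if 0 < m then (m % 26) :: lsdN (m / 26) else []
termination_by m
decreasing_by omega

lemma lsdN_pos {m : Nat} (h : 0 < m) : lsdN m = (m % 26) :: lsdN (m / 26) := by
  rw [lsdN, if_pos h]

lemma lsdN_zero : lsdN 0 = [] := by rw [lsdN]; simp

-- LSB-first digits padded to exactly p positions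
def lsdPadN : Nat → Nat → List Nat
  | 0, _ => []
  | p+1, m => (m % 26) :: lsdPadN p (m / 26)

-- MSB-first digits over p positions (what A computes), over Int and Nat
def msdI : Nat → Int → List Int
  | 0, _ => []
  | p+1, n =>
    let d := PySem.Int.truncdiv n ((26:Int)^p)
    d :: msdI p (n - d * (26:Int)^p)

def msdN : Nat → Nat → List Nat
  | 0, _ => []
  | p+1, m => (m / 26^p) :: msdN p (m % 26^p)

lemma altLoop_eq (n : Int) (ds : List Char) :
    altLoop n ds = ds ++ (lsdN n.toNat).map chrN := by
  induction n, ds using altLoop.induct with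
  | case1 n ds h ih =>
    rw [altLoop, dif_pos h, ih]
    have e1 : PySem.Int.floordiv n 26 = n / 26 := PySem.Int.floordiv_eq_ediv_of_pos (by norm_num)
    have h1 : PySem.Int.mod n 26 = ((n.toNat % 26 : Nat) : Int) := by
      rw [PySem.Int.mod_eq_emod_of_pos (by norm_num)]; omega
    have h2 : (PySem.Int.floordiv n 26).toNat = n.toNat / 26 := by rw [e1]; omega
    rw [h1, h2, chrB_natCast, lsdN_pos (m := n.toNat) (by omega)]
    simp
  | case2 n ds h =>
    rw [altLoop, dif_neg h]
    have : n.toNat = 0 := by omega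
    rw [this, lsdN_zero]
    simp

lemma foldA (p : Nat) (cs : List Char) (n : Int) :
    (((List.range p).reverse).foldl stepA (cs, n)).1 = cs ++ (msdI p n).map chrI := by
  induction p generalizing cs n with
  | zero => simp [msdI]
  | succ p ih =>
    rw [List.range_succ, List.reverse_append]
    simp only [List.reverse_singleton, List.singleton_append, List.foldl_cons]
    rw [msdI]
    simp only [stepA]
    rw [ih]
    simp

lemma msdI_cast (p : Nat) (m : Nat) : (msdI p (m : Int)).map chrI = (msdN p m).map chrN := by
  induction p generalizing m with
  | zero => simp [msdI, msdN]
  | succ p ih =>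
    rw [msdI, msdN]
    have hpow : ((26:Int)^p) = ((26^p : Nat) : Int) := by push_cast; ring
    have hd : PySem.Int.truncdiv (m : Int) ((26:Int)^p) = ((m / 26^p : Nat) : Int) := by
      rw [hpow]; simp [PySem.Int.truncdiv]
    have hrem : (m : Int) - ((m / 26^p : Nat) : Int) * ((26:Int)^p) = ((m % 26^p : Nat) : Int) := by
      rw [hpow]
      have h : ((26^p : Nat) : Int) * ((m / 26^p : Nat) : Int) + ((m % 26^p : Nat) : Int) = (m : Int) := by
        exact_mod_cast Nat.div_add_mod m (26^p)
      linarith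
    simp only [List.map_cons, hd, hrem, ih, chrI_natCast]

lemma lsdPadN_succ (p : Nat) : ∀ m, m < 26^(p+1) →
    lsdPadN (p+1) m = lsdPadN p (m % 26^p) ++ [m / 26^p] := by
  induction p with
  | zero =>
    intro m hm
    have hm' : m < 26 := by simpa using hm
    show (m % 26) :: lsdPadN 0 (m / 26) = lsdPadN 0 (m % 26^0) ++ [m / 26^0]
    simp [lsdPadN, Nat.mod_eq_of_lt hm']
  | succ p ih =>
    intro m hm
    rw [lsdPadN]
    have hdiv : m / 26 < 26^(p+1) := by
      rw [Nat.div_lt_iff_lt_mul (by norm_num : (0:Nat) < 26)]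
      calc m < 26^(p+2) := hm
        _ = 26^(p+1) * 26 := by ring
    rw [ih (m / 26) hdiv]
    show (m % 26) :: (lsdPadN p (m / 26 % 26^p) ++ [m / 26 / 26^p])
        = lsdPadN (p+1) (m % 26^(p+1)) ++ [m / 26^(p+1)]
    rw [lsdPadN]
    have e1 : m % 26^(p+1) % 26 = m % 26 :=
      Nat.mod_mod_of_dvd m (dvd_pow_self 26 (by omega))
    have e2 : m % 26^(p+1) / 26 = m / 26 % 26^p := by
      have h := Nat.mod_mul_right_div_self m 26 (26^p)
      calc m % 26^(p+1) / 26 = m % (26 * 26^p) / 26 := by ring_nf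
        _ = m / 26 % 26^p := h
    have e3 : m / 26^(p+1) = m / 26 / 26^p := by
      rw [Nat.div_div_eq_div_mul]
      congr 1
      ring
    rw [e1, e2, e3]
    simp

lemma msdN_eq_reverse_lsdPadN (p : Nat) : ∀ m, m < 26^p → msdN p m = (lsdPadN p m).reverse := by
  induction p with
  | zero => intro m _; simp [msdN, lsdPadN]
  | succ p ih =>
    intro m hm
    rw [msdN, lsdPadN_succ p m hm, List.reverse_append]
    have hlt : m % 26^p < 26^p := Nat.mod_lt m (pow_pos (by norm_num) p)
    rw [ih (m % 26^p) hlt]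
    simp

lemma lsdPadN_eq_pad (p : Nat) : ∀ m, m < 26^p →
    lsdPadN p m = lsdN m ++ List.replicate (p - (lsdN m).length) 0 := by
  induction p with
  | zero =>
    intro m hm
    have : m = 0 := by simpa using hm
    subst this
    rw [lsdN_zero]
    simp [lsdPadN]
  | succ p ih =>
    intro m hm
    rcases Nat.eq_zero_or_pos m with h0 | hpos
    · subst h0
      rw [lsdN_zero, lsdPadN]
      have h := ih 0 (pow_pos (by norm_num) p)
      rw [lsdN_zero] at h
      simp only [Nat.zero_mod, Nat.zero_div, h]
      simp [List.replicate_succ]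
    · rw [lsdN_pos hpos, lsdPadN]
      have hdiv : m / 26 < 26^p := by
        rw [Nat.div_lt_iff_lt_mul (by norm_num : (0:Nat) < 26)]
        calc m < 26^(p+1) := hm
          _ = 26^p * 26 := by ring
      rw [ih (m / 26) hdiv]
      simp [List.length_cons]

lemma lsdN_length_le (p : Nat) : ∀ m, m < 26^p → (lsdN m).length ≤ p := by
  induction p with
  | zero => intro m hm; rw [lsdN, if_neg (by omega)]; simp
  | succ p ih =>
    intro m hm
    rcases Nat.eq_zero_or_pos m with h0 | hpos
    · subst h0; rw [lsdN_zero]; simp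
    · rw [lsdN_pos hpos]
      have hdiv : m / 26 < 26^p := by
        rw [Nat.div_lt_iff_lt_mul (by norm_num : (0:Nat) < 26)]
        calc m < 26^(p+1) := hm
          _ = 26^p * 26 := by ring
      have := ih (m / 26) hdiv
      simpa using this

lemma lsdN_length_gt (p : Nat) : ∀ m, 26^p ≤ m → p < (lsdN m).length := by
  induction p with
  | zero => intro m hm; rw [lsdN_pos (by simpa using hm)]; simp
  | succ p ih =>
    intro m hm
    have hpos : 0 < m := lt_of_lt_of_le (pow_pos (by norm_num) (p+1)) hm
    rw [lsdN_pos hpos]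
    have hdiv : 26^p ≤ m / 26 := by
      rw [Nat.le_div_iff_mul_le (by norm_num : (0:Nat) < 26)]
      calc 26^p * 26 = 26^(p+1) := by ring
        _ ≤ m := hm
    have := ih (m / 26) hdiv
    simpa using this

lemma findP_lt (num : Int) (p : Nat) : num < (26:Int)^(findP num p) := by
  induction p using findP.induct (num := num) with
  | case1 p h ih => rw [findP, dif_pos h]; exact ih
  | case2 p h => rw [findP, dif_neg h]; omega

lemma findP_min (num : Int) (p : Nat) :
    findP num p = p ∨ (26:Int)^(findP num p - 1) ≤ num := by
  induction p using findP.induct (num := num) with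
  | case1 p h ih =>
    rw [findP, dif_pos h]
    rcases ih with heq | hle
    · right; rw [heq]; simpa using h
    · right; exact hle
  | case2 p h => left; rw [findP, dif_neg h]

-- the digit count A computes equals the length of B's digit list (for num > 0)
lemma lsdN_length_eq (num : Int) (hpos : 0 < num) :
    (lsdN num.toNat).length = findP num 0 := by
  have hlt : num < (26:Int)^(findP num 0) := findP_lt num 0
  have hcast : ((26^(findP num 0) : Nat) : Int) = (26:Int)^(findP num 0) := by push_cast; ring
  have hltN : num.toNat < 26^(findP num 0) := by omega
  have hle := lsdN_length_le (findP num 0) num.toNat hltN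
  rcases findP_min num 0 with h0 | hge
  · exfalso
    rw [h0] at hlt
    norm_num at hlt
    omega
  · have hq1 : findP num 0 ≠ 0 := by
      intro h
      rw [h] at hlt
      norm_num at hlt
      omega
    have hcast2 : ((26^(findP num 0 - 1) : Nat) : Int) = (26:Int)^(findP num 0 - 1) := by
      push_cast; ring
    have hgeN : 26^(findP num 0 - 1) ≤ num.toNat := by omega
    have := lsdN_length_gt (findP num 0 - 1) num.toNat hgeN
    omega

-- ===== VERDICT (by name: the statement is the Claim_ definition above) =====
theorem letter_index_spec : Claim_equal_letter_index := by
  unfold Claim_equal_letter_index Spec_letter_index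
  intro num var _
  by_cases h0 : num = 0
  · subst h0
    simp [letter_index, letter_index_alt]
  · simp only [letter_index, letter_index_alt, if_neg h0]
    by_cases hpos : 0 < num
    · obtain ⟨m, rfl⟩ : ∃ m : Nat, num = (m : Int) := ⟨num.toNat, by omega⟩
      rw [foldA, altLoop_eq]
      congr 1
      rw [msdI_cast]
      have hlt : (m : Int) < (26:Int)^(findP (m : Int) 0) := findP_lt (m : Int) 0
      have hcast : ((26^(findP (m : Int) 0) : Nat) : Int) = (26:Int)^(findP (m : Int) 0) := by
        push_cast; ring
      have hltN : m < 26^(findP (m : Int) 0) := by omega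
      have hlen : (lsdN ((m : Int)).toNat).length = findP (m : Int) 0 :=
        lsdN_length_eq (m : Int) hpos
      rw [Int.toNat_natCast] at hlen
      rw [msdN_eq_reverse_lsdPadN _ _ hltN, lsdPadN_eq_pad _ _ hltN, hlen]
      simp [List.map_reverse, List.append_assoc]
    · -- num < 0: A's while loop stops at p = 0, B's while loop runs zero times
      have hfp : findP num 0 = 0 := by
        rw [findP, dif_neg (by norm_num; omega)]
      rw [hfp, altLoop, dif_neg hpos]
      simp
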